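-- pv_equiv track=rewrite | github.com/HorizonRoboticsInternal/RoboOrchardLab | robo_orchard_lab/dataset/robot/dataset_ex.py | _get_total_batch_num
-- ===== SOURCE A (Python) =====
-- def _get_batch_num(batch_size: int, num_samples: int, drop_last: bool) -> int:
--     if drop_last:
--         return num_samples // batch_size
--     else:
--         return (num_samples + batch_size - 1) // batch_size
--
-- def _get_total_batch_num(
--     rows: int, num_workers: int, batch_size: int = 1, drop_last: bool = False
-- ) -> int:
--     """Calculate the total number of batches for the dataset.
--
--     Pytorch `DataLoader` with multiple workers will shard the dataset into
--     `num_workers` shards, and the default method to calculate the total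
--     number of batches does not consider the sharding, which will cause
--     inaccurate total batch number when using multiple workers. This method
--     provides a way to calculate the actual batch number.
--
--     Note:
--         The parameters should be the same as the parameters used in the
--         DataLoader, otherwise the calculated batch number may
--         be inaccurate.
--
--     Args:
--         rows (int): The total number of rows in the dataset.
--         num_workers (int): The number of workers to use for loading
--             the data.
--         batch_size (int, optional): The batch size to use for loading
--             the data. Defaults to 1.
--         drop_last (bool, optional): Whether to drop the last incomplete
--             batch. Defaults to False.
--
--     """
--     if num_workers <= 1:
--         return _get_batch_num(
--             batch_size=batch_size,
--             num_samples=rows,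
--             drop_last=drop_last,
--         )
--     total_batches = 0
--     for worker_id in range(num_workers):
--         worker_num_samples = rows // num_workers
--         if worker_id < rows % num_workers:
--             worker_num_samples += 1
--
--         total_batches += _get_batch_num(
--             batch_size=batch_size,
--             num_samples=worker_num_samples,
--             drop_last=drop_last,
--         )
--     return total_batches
-- ===== SOURCE B (Python) =====
-- def _get_total_batch_num(
--     rows: int, num_workers: int, batch_size: int = 1, drop_last: bool = False
-- ) -> int:
--     # O(1): normalise worker count with max, split rows with one divmod, and
--     # weight the two distinct per-worker batch counts by their multiplicities.
--     w = max(num_workers, 1)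
--     q, r = divmod(rows, w)
--     if drop_last:
--         return r * ((q + 1) // batch_size) + (w - r) * (q // batch_size)
--     return r * ((q + batch_size) // batch_size) + (w - r) * ((q + batch_size - 1) // batch_size)
-- ===== Notes on version B (the rewrite author's own statement) =====
-- stated objective: faster
-- what changed: Removes the per-worker loop and the helper function entirely: worker count is normalised with max(num_workers,1), one divmod splits rows into the two distinct per-worker sample counts, and a single loop-free expression weights the two batch counts by their multiplicities (r and w-r).
import Mathlib
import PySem

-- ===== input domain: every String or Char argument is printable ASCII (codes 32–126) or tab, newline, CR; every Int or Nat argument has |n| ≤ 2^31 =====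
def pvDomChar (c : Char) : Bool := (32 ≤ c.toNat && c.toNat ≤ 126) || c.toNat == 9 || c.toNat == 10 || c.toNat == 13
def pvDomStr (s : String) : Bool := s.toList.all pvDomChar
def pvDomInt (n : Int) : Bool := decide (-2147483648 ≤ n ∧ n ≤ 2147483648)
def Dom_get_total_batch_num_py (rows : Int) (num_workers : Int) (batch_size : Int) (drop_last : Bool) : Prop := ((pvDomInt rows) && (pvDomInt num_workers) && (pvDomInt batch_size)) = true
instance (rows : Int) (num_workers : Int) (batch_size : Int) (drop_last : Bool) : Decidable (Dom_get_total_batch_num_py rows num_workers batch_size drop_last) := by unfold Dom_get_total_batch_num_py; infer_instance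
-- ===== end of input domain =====

-- B replaces A's helper + per-worker loop by a loop-free weighted formula (max-normalised worker count, one divmod); proved equal for batch_size ≠ 0.


-- ===== PORT A =====
def get_batch_num_py (batch_size : Int) (num_samples : Int) (drop_last : Bool) : Int :=
  if drop_last then PySem.Int.floordiv num_samples batch_size
  else PySem.Int.floordiv (num_samples + batch_size - 1) batch_size

def get_total_batch_num_py (rows : Int) (num_workers : Int) (batch_size : Int) (drop_last : Bool) : Int :=
  if num_workers ≤ 1 then get_batch_num_py batch_size rows drop_last
  else
    (PySem.List.pyRange 0 num_workers 1).foldl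
      (fun total_batches worker_id =>
        let worker_num_samples := PySem.Int.floordiv rows num_workers
        let worker_num_samples :=
          if worker_id < PySem.Int.mod rows num_workers then worker_num_samples + 1
          else worker_num_samples
        total_batches + get_batch_num_py batch_size worker_num_samples drop_last) 0

-- ===== PORT B =====
def get_total_batch_num_py_alt (rows : Int) (num_workers : Int) (batch_size : Int) (drop_last : Bool) : Int :=
  let w := max num_workers 1
  let q := PySem.Int.floordiv rows w
  let r := PySem.Int.mod rows w
  if drop_last then
    r * PySem.Int.floordiv (q + 1) batch_size + (w - r) * PySem.Int.floordiv q batch_size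
  else
    r * PySem.Int.floordiv (q + batch_size) batch_size
      + (w - r) * PySem.Int.floordiv (q + batch_size - 1) batch_size

-- ===== PRECONDITION & SPEC =====
-- batch_size = 0 makes Python A raise ZeroDivisionError; those inputs are excluded.
def Pre_get_total_batch_num_py (rows : Int) (num_workers : Int) (batch_size : Int) (drop_last : Bool) : Prop := batch_size ≠ 0
instance (rows : Int) (num_workers : Int) (batch_size : Int) (drop_last : Bool) : Decidable (Pre_get_total_batch_num_py rows num_workers batch_size drop_last) := by unfold Pre_get_total_batch_num_py; infer_instance
def pvWitness_get_total_batch_num_py : Int × Int × Int × Bool := (10, 4, 3, false)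

def Spec_get_total_batch_num_py (rows : Int) (num_workers : Int) (batch_size : Int) (drop_last : Bool) (out : Int) : Prop := out = get_total_batch_num_py_alt rows num_workers batch_size drop_last
instance (rows : Int) (num_workers : Int) (batch_size : Int) (drop_last : Bool) (out : Int) : Decidable (Spec_get_total_batch_num_py rows num_workers batch_size drop_last out) := by unfold Spec_get_total_batch_num_py; infer_instance

-- ===== CLAIM (what is proved, stated in full; the proofs are below) =====
def Claim_equal_get_total_batch_num_py : Prop := ∀ (rows : Int) (num_workers : Int) (batch_size : Int) (drop_last : Bool), Dom_get_total_batch_num_py rows num_workers batch_size drop_last → Pre_get_total_batch_num_py rows num_workers batch_size drop_last → Spec_get_total_batch_num_py rows num_workers batch_size drop_last (get_total_batch_num_py rows num_workers batch_size drop_last)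

-- ===== LEMMAS AND PROOFS =====

-- the loop's sum, with only two distinct summands, in closed form
theorem foldl_two_values (x y : Int) (n r : Int) (h0 : 0 ≤ r) (hrn : r ≤ n) :
    (PySem.List.pyRange 0 n 1).foldl (fun acc i => acc + if i < r then x else y) 0
      = r * x + (n - r) * y := by
  rw [PySem.List.foldl_add]
  rw [PySem.List.pyRange_one_append 0 r n h0 hrn]
  rw [List.map_append, List.sum_append]
  have h1 : (PySem.List.pyRange 0 r 1).map (fun i => if i < r then x else y)
      = (PySem.List.pyRange 0 r 1).map (fun _ => x) := by
    apply List.map_congr_left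
    intro i hi
    rw [PySem.List.mem_pyRange_one] at hi
    simp [hi.2]
  have h2 : (PySem.List.pyRange r n 1).map (fun i => if i < r then x else y)
      = (PySem.List.pyRange r n 1).map (fun _ => y) := by
    apply List.map_congr_left
    intro i hi
    rw [PySem.List.mem_pyRange_one] at hi
    simp [not_lt.mpr hi.1]
  rw [h1, h2, PySem.List.sum_map_const_int, PySem.List.sum_map_const_int,
    PySem.List.length_pyRange_one, PySem.List.length_pyRange_one]
  have : ((r - 0).toNat : Int) = r := by omega
  rw [this]
  have : ((n - r).toNat : Int) = n - r := by omega
  rw [this]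
  ring

theorem floordiv_one (a : Int) : PySem.Int.floordiv a 1 = a := by
  rw [PySem.Int.floordiv_eq_ediv_of_pos (by omega)]; omega

theorem mod_one (a : Int) : PySem.Int.mod a 1 = 0 := by
  rw [PySem.Int.mod_eq_emod_of_pos (by omega)]; omega

-- ===== VERDICT (by name: the statement is the Claim_ definition above) =====
theorem get_total_batch_num_py_spec : Claim_equal_get_total_batch_num_py := by
  intro rows nw bs dl _ _
  unfold Spec_get_total_batch_num_py get_total_batch_num_py get_total_batch_num_py_alt
  by_cases h : nw ≤ 1
  · have hmax : max nw 1 = 1 := by omega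
    simp only [h, if_true, hmax, floordiv_one, mod_one, get_batch_num_py]
    cases dl <;> simp
  · have hmax : max nw 1 = nw := by omega
    simp only [h, if_false, hmax]
    have hnw : 0 < nw := by omega
    have h0 : 0 ≤ PySem.Int.mod rows nw := PySem.Int.mod_nonneg rows hnw
    have hlt : PySem.Int.mod rows nw < nw := PySem.Int.mod_lt rows hnw
    have key := foldl_two_values
      (get_batch_num_py bs (PySem.Int.floordiv rows nw + 1) dl)
      (get_batch_num_py bs (PySem.Int.floordiv rows nw) dl)
      nw (PySem.Int.mod rows nw) h0 (le_of_lt hlt)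
    simp only [apply_ite (fun s => get_batch_num_py bs s dl)] at *
    rw [show (fun (total_batches worker_id : Int) =>
        total_batches +
          if worker_id < PySem.Int.mod rows nw then
            get_batch_num_py bs (PySem.Int.floordiv rows nw + 1) dl
          else get_batch_num_py bs (PySem.Int.floordiv rows nw) dl)
      = (fun acc i => acc + if i < PySem.Int.mod rows nw then
            get_batch_num_py bs (PySem.Int.floordiv rows nw + 1) dl
          else get_batch_num_py bs (PySem.Int.floordiv rows nw) dl) from rfl]
    rw [key]
    have harg : PySem.Int.floordiv rows nw + 1 + bs - 1 = PySem.Int.floordiv rows nw + bs := by ring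
    cases dl <;> simp [get_batch_num_py, harg]
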